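-- pv_equiv track=rewrite | github.com/Batinou/AdventOfCode25 | Jour3/jour3.py | maxarray
-- ===== SOURCE A (Python) =====
-- def maxarray(array, length):
--     newarray = []
--     if(length == 1):
--         newarray.append(max(array))
--         return newarray
--     else:
--         maximum = max(array[0:-(length - 1)])
--         newarray.append(maximum)
--         arraydroite = array[array.index(maximum) + 1:]
--         arrayrec = maxarray(arraydroite, length - 1)
--         return newarray + arrayrec
-- ===== SOURCE B (Python) =====
-- def maxarray(array, length):
--     # Largest length-`length` subsequence via a one-pass monotonic-stack greedy.
--     n = len(array)
--     if not 1 <= length <= n: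
--         # same domain as the recursive version: no subsequence of that length exists
--         raise ValueError("length must be between 1 and len(array)")
--     stack = []
--     for i, x in enumerate(array):
--         left = n - i  # elements remaining, including x
--         while stack and stack[-1] < x and len(stack) - 1 + left >= length:
--             stack.pop()
--         if len(stack) < length:
--             stack.append(x)
--     return stack
-- ===== Notes on version B (the rewrite author's own statement) =====
-- stated objective: faster
-- what changed: Replaced A's recursion that for each of the `length` picks rescans the array (max of a slice, list.index, re-slicing) by a single left-to-right pass with a monotonic stack: pop smaller stack tops while enough elements remain to keep the stack fillable, push while the stack is short.
import Mathlib
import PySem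

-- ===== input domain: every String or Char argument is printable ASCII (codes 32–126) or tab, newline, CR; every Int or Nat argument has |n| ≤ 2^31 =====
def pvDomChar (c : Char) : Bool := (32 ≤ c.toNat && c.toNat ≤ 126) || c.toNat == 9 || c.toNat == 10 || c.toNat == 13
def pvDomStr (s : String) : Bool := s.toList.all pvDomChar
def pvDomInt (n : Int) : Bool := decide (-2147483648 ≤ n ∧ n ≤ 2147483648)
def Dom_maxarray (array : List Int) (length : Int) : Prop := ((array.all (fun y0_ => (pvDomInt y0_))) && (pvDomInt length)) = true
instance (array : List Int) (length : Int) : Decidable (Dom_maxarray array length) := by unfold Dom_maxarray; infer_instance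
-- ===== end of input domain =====

-- B replaces A's recursive "max of window, cut at its index" greedy (which rescans the array
-- for every picked element) by a single-pass monotonic-stack greedy.

-- ===== PORT A =====
-- literal port of A: recursion on the right-hand slice; the `none` branches are exactly
-- where Python raises ValueError (max of an empty list/slice), excluded by Pre_.
def maxarray (array : List Int) (length : Int) : List Int :=
  if length = 1 then
    match PySem.List.max? array (fun y => y) with
    | some m => [m]
    | none => []                -- max([]) raises ValueError; outside Pre_
  else
    match _hm : PySem.List.max? (PySem.List.slice array (some 0) (some (-(length - 1)))) (fun y => y) with
    | none => []                -- max of empty slice raises ValueError; outside Pre_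
    | some m =>
      match hi : PySem.List.index? array m with
      | none => []              -- unreachable: m ∈ array
      | some i =>
        m :: maxarray (PySem.List.slice array (some ((i : Int) + 1)) none) (length - 1)
termination_by array.length
decreasing_by
  have hi' : i < array.length := by
    obtain ⟨hk, -, -⟩ := PySem.List.getElem_of_index?_eq_some hi
    exact hk
  have hc : ((i : Int) + 1) = ((i + 1 : Nat) : Int) := by push_cast; ring
  rw [hc, PySem.List.slice_from_natCast, List.length_drop]
  omega

-- ===== PORT B =====
-- B's stack is modelled top-at-head (Python appends/pops at the right end); the final
-- `reverse` restores Python's bottom-first list order.  pvPop is the while-pop loop,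
-- pvStep one iteration of the for loop (pop phase then conditional push), pvRun the loop.
def pvPop (s : List Int) (x left k : Int) : List Int :=
  match s with
  | [] => []
  | t :: rest =>
    if t < x ∧ (rest.length : Int) + left ≥ k then pvPop rest x left k else t :: rest

def pvStep (s : List Int) (x left k : Int) : List Int :=
  if ((pvPop s x left k).length : Int) < k then x :: pvPop s x left k else pvPop s x left k

def pvRun (r : List Int) (s : List Int) (left k : Int) : List Int :=
  match r with
  | [] => s
  | x :: rest => pvRun rest (pvStep s x left k) (left - 1) k

def maxarray_alt (array : List Int) (length : Int) : List Int :=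
  if length < 1 ∨ (array.length : Int) < length then []  -- ValueError: outside Pre_
  else (pvRun array [] (array.length : Int) length).reverse

-- ===== PRECONDITION & SPEC =====
-- A raises ValueError (max of an empty list/slice) exactly when length < 1 or length > len(array).
def Pre_maxarray (array : List Int) (length : Int) : Prop :=
  1 ≤ length ∧ length ≤ (array.length : Int)
instance (array : List Int) (length : Int) : Decidable (Pre_maxarray array length) := by
  unfold Pre_maxarray; infer_instance

def pvWitness_maxarray : List Int × Int := ([3, 1, 4, 1, 5], 3)

def Spec_maxarray (array : List Int) (length : Int) (out : List Int) : Prop := out = maxarray_alt array length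
instance (array : List Int) (length : Int) (out : List Int) : Decidable (Spec_maxarray array length out) := by unfold Spec_maxarray; infer_instance

-- ===== CLAIM (what is proved, stated in full; the proofs are below) =====
def Claim_equal_maxarray : Prop := ∀ (array : List Int) (length : Int), Dom_maxarray array length → Pre_maxarray array length → Spec_maxarray array length (maxarray array length)

-- ===== LEMMAS AND PROOFS =====

-- popping never invents elements
theorem pvPop_subset {s : List Int} {x left k t : Int} (h : t ∈ pvPop s x left k) : t ∈ s := by
  induction s with
  | nil => simp [pvPop] at h
  | cons a rest ih =>
    rw [pvPop] at h
    split at h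
    · exact List.mem_cons_of_mem _ (ih h)
    · exact h

theorem pvStep_subset {s : List Int} {x left k t : Int} (h : t ∈ pvStep s x left k) :
    t = x ∨ t ∈ s := by
  rw [pvStep] at h
  split at h
  · rw [List.mem_cons] at h
    rcases h with rfl | h
    · exact Or.inl rfl
    · exact Or.inr (pvPop_subset h)
  · exact Or.inr (pvPop_subset h)

-- the stack after a run only holds initial-stack or consumed elements
theorem pvRun_subset {r : List Int} {s : List Int} {left k t : Int}
    (h : t ∈ pvRun r s left k) : t ∈ s ∨ t ∈ r := by
  induction r generalizing s left with
  | nil => exact Or.inl (by simpa [pvRun] using h)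
  | cons x rest ih =>
    rw [pvRun] at h
    rcases ih h with h' | h'
    · rcases pvStep_subset h' with rfl | h''
      · exact Or.inr List.mem_cons_self
      · exact Or.inl h''
    · exact Or.inr (List.mem_cons_of_mem _ h')

-- a strictly dominating element with enough room pops the whole stack
theorem pvPop_all {s : List Int} {x left k : Int} (hall : ∀ t ∈ s, t < x) (hleft : left ≥ k) :
    pvPop s x left k = [] := by
  induction s with
  | nil => rfl
  | cons a rest ih =>
    rw [pvPop, if_pos ⟨hall a List.mem_cons_self, by have := Int.natCast_nonneg rest.length; omega⟩]
    exact ih (fun t ht => hall t (List.mem_cons_of_mem _ ht))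

-- splitting a run at a point of the input
theorem pvRun_append (u v : List Int) (s : List Int) (left k : Int) :
    pvRun (u ++ v) s left k = pvRun v (pvRun u s left k) (left - (u.length : Int)) k := by
  induction u generalizing s left with
  | nil => simp [pvRun]
  | cons x rest ih =>
    rw [List.cons_append, pvRun, pvRun, ih]
    congr 1
    simp only [List.length_cons]
    push_cast
    ring

-- a bottom element that is never poppable rides along unchanged under the pop loop
theorem pvPop_append {m x left k : Int} (hnot : ¬(m < x ∧ left ≥ k)) (s : List Int) :
    pvPop (s ++ [m]) x left k = pvPop s x left (k - 1) ++ [m] := by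
  induction s with
  | nil =>
    show pvPop [m] x left k = [] ++ [m]
    rw [pvPop, if_neg (by rintro ⟨h1, h2⟩; exact hnot ⟨h1, by simpa using h2⟩)]
    rfl
  | cons t rest ih =>
    rw [List.cons_append, pvPop, pvPop]
    by_cases hc : t < x ∧ ((rest.length : Int) + left ≥ k - 1)
    · rw [if_pos ⟨hc.1, by simp only [List.length_append, List.length_cons, List.length_nil]; push_cast; omega⟩,
        if_pos hc, ih]
    · rw [if_neg (fun h => hc ⟨h.1, by
          simp only [List.length_append, List.length_cons, List.length_nil] at h
          push_cast at h ⊢; omega⟩), if_neg hc, List.cons_append]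

-- ... and under one full step of the loop (k ≥ 1 makes the push thresholds line up)
theorem pvStep_append {m x left k : Int} (hnot : ¬(m < x ∧ left ≥ k)) (s : List Int) :
    pvStep (s ++ [m]) x left k = pvStep s x left (k - 1) ++ [m] := by
  rw [pvStep, pvStep, pvPop_append hnot s]
  by_cases hc : ((pvPop s x left (k - 1)).length : Int) < k - 1
  · rw [if_pos (by simp only [List.length_append, List.length_cons, List.length_nil]; push_cast; omega),
      if_pos hc, List.cons_append]
  · rw [if_neg (by simp only [List.length_append, List.length_cons, List.length_nil]; push_cast; omega),
      if_neg hc]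

-- simulation: with an unpoppable bottom m, a run with budget k is a run with budget k-1 above m
theorem pvRun_sim {m k : Int} :
    ∀ (suf : List Int) (s : List Int) (left : Int),
    (∀ (j : Nat) (hj : j < suf.length), left - (j : Int) ≥ k → suf[j] ≤ m) →
    pvRun suf (s ++ [m]) left k = pvRun suf s left (k - 1) ++ [m] := by
  intro suf
  induction suf with
  | nil => intro s left _; rfl
  | cons x rest ih =>
    intro s left H
    have hnot : ¬(m < x ∧ left ≥ k) := by
      rintro ⟨hlt, hge⟩
      have := H 0 (by simp) (by simpa using hge)
      simp only [List.getElem_cons_zero] at this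
      omega
    rw [pvRun, pvRun, pvStep_append hnot s]
    exact ih (pvStep s x left (k - 1)) (left - 1)
      (fun j hj hge => by
        have := H (j + 1) (by simpa using hj) (by push_cast at hge ⊢; omega)
        simpa using this)

-- with budget 1 the stack is the running maximum (first maximal element kept)
theorem pvRun_k1 (r : List Int) (c : Int) :
    pvRun r [c] (r.length : Int) 1 = [r.foldl max c] := by
  induction r generalizing c with
  | nil => rfl
  | cons x rest ih =>
    rw [pvRun]
    have hlen : ((x :: rest).length : Int) - 1 = (rest.length : Int) := by
      simp only [List.length_cons]; push_cast; ring
    by_cases hcx : c < x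
    · have hp : pvPop [c] x ((x :: rest).length : Int) 1 = [] := by
        simp only [pvPop, List.length_nil, List.length_cons, Nat.cast_zero,
          Nat.cast_add, Nat.cast_one]
        rw [if_pos ⟨hcx, by omega⟩]
      have h1 : pvStep [c] x ((x :: rest).length : Int) 1 = [x] := by
        rw [pvStep, hp]; norm_num
      rw [h1, hlen, ih x, List.foldl_cons, max_eq_right (le_of_lt hcx)]
    · have hp : pvPop [c] x ((x :: rest).length : Int) 1 = [c] := by
        simp only [pvPop, List.length_nil, List.length_cons, Nat.cast_zero,
          Nat.cast_add, Nat.cast_one]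
        rw [if_neg (fun h => hcx h.1)]
      have h1 : pvStep [c] x ((x :: rest).length : Int) 1 = [c] := by
        rw [pvStep, hp]; norm_num
      rw [h1, hlen, ih c, List.foldl_cons, max_eq_left (le_of_not_gt hcx)]

-- main equivalence, by strong induction on the array length
theorem maxarray_key : ∀ (n : Nat) (arr : List Int), arr.length = n → ∀ (k : Int),
    1 ≤ k → k ≤ (n : Int) → maxarray arr k = (pvRun arr [] (n : Int) k).reverse := by
  intro n
  induction n using Nat.strong_induction_on with
  | _ n IH =>
  intro arr hlen k hk1 hkn
  by_cases hk : k = 1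
  · -- base case: length == 1 → [max array]; the stack run keeps the running maximum
    subst hk
    have hne : arr ≠ [] := by intro h; subst h; simp at hlen; omega
    obtain ⟨x, rest, rfl⟩ := List.exists_cons_of_ne_nil hne
    rw [maxarray, if_pos rfl, PySem.List.max?_id_cons, pvRun]
    have h1 : pvStep [] x ((n : Int)) 1 = [x] := by norm_num [pvStep, pvPop]
    rw [h1, ← hlen]
    have hlen1 : ((x :: rest).length : Int) - 1 = (rest.length : Int) := by
      simp only [List.length_cons]; push_cast; ring
    rw [hlen1, pvRun_k1 rest x]
    rfl
  · -- step case: pick the first maximum of the window, recurse on the right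
    have hk2 : 2 ≤ k := by omega
    have hKk : ((k.toNat : Nat) : Int) = k := Int.toNat_of_nonneg (by omega)
    set K := k.toNat with hKdef
    have hK2 : 2 ≤ K := by omega
    have hKn : K ≤ n := by omega
    -- the window array[0:-(length-1)] is take (n-(K-1))
    have hsl : PySem.List.slice arr (some 0) (some (-(k - 1))) = List.take (n - (K - 1)) arr := by
      have hc : (-(k - 1)) = (-(((K - 1 : Nat)) : Int)) := by omega
      rw [hc, PySem.List.slice_zero_start, PySem.List.slice_to_neg_natCast arr (K - 1) (by omega),
        hlen]
    have hpne : List.take (n - (K - 1)) arr ≠ [] := by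
      intro h
      have := congrArg List.length h
      simp only [List.length_take, List.length_nil, hlen] at this
      omega
    obtain ⟨m, hm⟩ : ∃ m, PySem.List.max? (List.take (n - (K - 1)) arr) (fun y => y) = some m := by
      cases hmm : PySem.List.max? (List.take (n - (K - 1)) arr) (fun y => y) with
      | none => exact absurd ((PySem.List.max?_eq_none_iff _ _).mp hmm) hpne
      | some m => exact ⟨m, rfl⟩
    have hmmem : m ∈ List.take (n - (K - 1)) arr := PySem.List.max?_mem hm
    have hmarr : m ∈ arr := List.take_subset _ _ hmmem
    obtain ⟨i, hi⟩ : ∃ i, PySem.List.index? arr m = some i := by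
      cases hii : PySem.List.index? arr m with
      | none =>
        have := (PySem.List.index?_isSome_iff arr m).mpr hmarr
        rw [hii] at this
        simp at this
      | some i => exact ⟨i, rfl⟩
    obtain ⟨hilt, hieq, hmin⟩ := PySem.List.getElem_of_index?_eq_some hi
    -- the first occurrence of m in arr lies inside the window
    obtain ⟨j0, hj0lt, hj0⟩ := List.mem_iff_getElem.mp hmmem
    have hj0lt' : j0 < n - (K - 1) := by
      simp only [List.length_take, hlen] at hj0lt
      omega
    rw [List.getElem_take] at hj0
    have hiw : i < n - (K - 1) := by
      by_contra hc
      exact hmin j0 (by omega) hj0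
    -- every element of the window is ≤ m, by max?_isMax
    have hwin : ∀ (j : Nat) (hj : j < n - (K - 1)), arr[j]'(by omega) ≤ m := by
      intro j hj
      have hjmem : arr[j]'(by omega) ∈ List.take (n - (K - 1)) arr := by
        have hjl : j < (List.take (n - (K - 1)) arr).length := by
          simp only [List.length_take, hlen]
          omega
        have := List.getElem_take (xs := arr) (j := n - (K - 1)) (i := j) (h := hjl)
        rw [← this]
        exact List.getElem_mem hjl
      exact PySem.List.max?_isMax hm _ hjmem
    -- unfold A down to its recursive call
    rw [maxarray, if_neg hk]
    rw [hsl]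
    split
    · rename_i heq
      rw [hm] at heq
      exact absurd heq (by simp)
    · rename_i m' heq
      rw [hm] at heq
      injection heq with heq'
      subst heq'
      split
      · rename_i heq2
        rw [hi] at heq2
        exact absurd heq2 (by simp)
      · rename_i i' heq2
        rw [hi] at heq2
        injection heq2 with heq2'
        subst heq2'
        -- A's tail slice is drop (i+1)
        have hsl2 : PySem.List.slice arr (some ((i : Int) + 1)) none = List.drop (i + 1) arr := by
          have hc : ((i : Int) + 1) = ((i + 1 : Nat) : Int) := by push_cast; ring
          rw [hc, PySem.List.slice_from_natCast]
        rw [hsl2]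
        -- induction hypothesis on the right-hand rest
        have hlen2 : (List.drop (i + 1) arr).length = n - (i + 1) := by
          simp [hlen]
        have hIH := IH (n - (i + 1)) (by omega) (List.drop (i + 1) arr) hlen2 (k - 1)
          (by omega) (by omega)
        -- the stack built from the strict prefix holds only elements < m
        have hs0 : ∀ t ∈ pvRun (List.take i arr) [] ((n : Int)) k, t < m := by
          intro t ht
          rcases pvRun_subset ht with h | h
          · simp at h
          · obtain ⟨jt, hjtlt, hjt⟩ := List.mem_iff_getElem.mp h
            have hjtlt' : jt < i := by
              simp only [List.length_take, hlen] at hjtlt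
              omega
            rw [List.getElem_take] at hjt
            have hne : t ≠ m := by
              rw [← hjt]
              exact hmin jt hjtlt'
            have hle : t ≤ m := by
              rw [← hjt]
              exact hwin jt (by omega)
            omega
        -- split B's run at the first window maximum
        have hsplit : arr = List.take i arr ++ (m :: List.drop (i + 1) arr) := by
          conv_lhs => rw [← List.take_append_drop i arr]
          rw [← List.getElem_cons_drop hilt, hieq]
        have hB : pvRun arr [] ((n : Int)) k
            = pvRun (List.drop (i + 1) arr) [] ((n : Int) - (i : Int) - 1) (k - 1) ++ [m] := by
          conv_lhs => rw [hsplit]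
          rw [pvRun_append]
          have hti : ((List.take i arr).length : Int) = (i : Int) := by
            simp only [List.length_take, hlen]
            push_cast [Nat.min_eq_left (by omega : i ≤ n)]
            ring
          rw [hti, pvRun]
          have hpopall : pvPop (pvRun (List.take i arr) [] ((n : Int)) k) m ((n : Int) - (i : Int)) k = [] :=
            pvPop_all hs0 (by omega)
          have hstep : pvStep (pvRun (List.take i arr) [] ((n : Int)) k) m ((n : Int) - (i : Int)) k = [m] := by
            rw [pvStep, hpopall]
            rw [if_pos (by simp only [List.length_nil, Nat.cast_zero]; omega)]
          rw [hstep]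
          have hsim := pvRun_sim (m := m) (k := k) (List.drop (i + 1) arr) []
            ((n : Int) - (i : Int) - 1)
            (by
              intro j hj hge
              rw [hlen2] at hj
              have hidx : i + 1 + j < n - (K - 1) := by omega
              have := List.getElem_drop (xs := arr) (i := i + 1) (j := j)
                (h := by rw [hlen2]; omega)
              rw [this]
              exact hwin (i + 1 + j) hidx)
          rw [List.nil_append] at hsim
          rw [show ((n : Int) - (i : Int) - 1) = ((n : Int) - (i : Int)) - 1 by ring] at *
          exact hsim
        rw [hB, hIH]
        have hcast : (((n - (i + 1) : Nat)) : Int) = (n : Int) - (i : Int) - 1 := by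
          omega
        rw [hcast]
        simp

-- ===== VERDICT (by name: the statement is the Claim_ definition above) =====
theorem maxarray_spec : Claim_equal_maxarray := by
  intro array length _ hpre
  unfold Spec_maxarray maxarray_alt
  rw [if_neg (by obtain ⟨h1, h2⟩ := hpre; omega)]
  exact maxarray_key array.length array rfl length hpre.1 hpre.2
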